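-- pv_equiv track=rewrite | github.com/VladislavSoren/homewor_oleg | m_2026_04_26/function_rhomb.py | get_rhomb
-- ===== SOURCE A (Python) =====
-- def get_rhomb(h, char = '-'):
--
--     rhomb = ''
--
--     for i in range(h):
--         spaces = (h - i) - 1
--         stars = (2 * i) + 1
--         row = ' ' * spaces + char * stars + '\n'
--         rhomb += row
--     for i in range((h - 1) - 1, 0 - 1, -1):
--         spaces = (h - i) - 1
--         stars = (2 * i) + 1
--         row = ' ' * spaces + char * stars + '\n'
--         rhomb += row
--
--     return rhomb
-- ===== SOURCE B (Python) =====
-- def get_rhomb(h, char = '-'):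
--     rhomb = ''
--     for r in range(2 * h - 1):
--         i = (h - 1) - abs((h - 1) - r)
--         rhomb += ' ' * ((h - i) - 1) + char * ((2 * i) + 1) + '\n'
--     return rhomb
-- ===== Notes on version B (the rewrite author's own statement) =====
-- stated objective: alternative
-- what changed: Replaces A's two directional loops (ascending then descending) with a single pass over all 2*h-1 rows, recovering each row's level by the reflection formula i = (h-1) - abs((h-1) - r).
import Mathlib
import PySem

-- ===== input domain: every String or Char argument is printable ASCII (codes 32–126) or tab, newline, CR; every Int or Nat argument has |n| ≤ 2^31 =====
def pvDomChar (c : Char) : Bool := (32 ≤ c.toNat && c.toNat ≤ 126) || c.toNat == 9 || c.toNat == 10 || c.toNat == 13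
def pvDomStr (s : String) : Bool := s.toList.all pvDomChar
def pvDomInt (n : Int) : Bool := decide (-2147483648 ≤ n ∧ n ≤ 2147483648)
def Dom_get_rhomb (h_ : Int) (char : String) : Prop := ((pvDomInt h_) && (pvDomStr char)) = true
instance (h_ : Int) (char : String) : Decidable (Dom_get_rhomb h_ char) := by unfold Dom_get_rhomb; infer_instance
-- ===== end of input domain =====

-- B replaces A's two directional loops with one reflection-indexed pass over all 2*h-1 rows
-- joined at the end (objective: alternative decomposition; same asymptotic cost).

-- ===== PORT A =====
-- rhomb += ' '*spaces + char*stars + '\n', first ascending then descending loop; on List Char.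
def get_rhomb (h_ : Int) (char : String) : String :=
  let cs := char.toList
  let r1 := (PySem.List.pyRange 0 h_ 1).foldl
    (fun acc i => acc ++ (PySem.List.pyRepeat [' '] ((h_ - i) - 1)
                  ++ PySem.List.pyRepeat cs ((2 * i) + 1) ++ ['\n'])) []
  let r2 := (PySem.List.pyRange ((h_ - 1) - 1) (0 - 1) (-1)).foldl
    (fun acc i => acc ++ (PySem.List.pyRepeat [' '] ((h_ - i) - 1)
                  ++ PySem.List.pyRepeat cs ((2 * i) + 1) ++ ['\n'])) r1
  String.ofList r2

-- ===== PORT B =====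
-- single pass r = 0 .. 2*h-2, level i = (h-1) - |(h-1) - r|, accumulated into one string.
def get_rhomb_alt (h_ : Int) (char : String) : String :=
  let cs := char.toList
  let rhomb := (PySem.List.pyRange 0 (2 * h_ - 1) 1).foldl
    (fun acc r =>
      let i := (h_ - 1) - |(h_ - 1) - r|
      acc ++ (PySem.List.pyRepeat [' '] ((h_ - i) - 1)
        ++ PySem.List.pyRepeat cs ((2 * i) + 1) ++ ['\n'])) []
  String.ofList rhomb

-- ===== PRECONDITION & SPEC =====
def Spec_get_rhomb (h_ : Int) (char : String) (out : String) : Prop := out = get_rhomb_alt h_ char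
instance (h_ : Int) (char : String) (out : String) : Decidable (Spec_get_rhomb h_ char out) := by unfold Spec_get_rhomb; infer_instance

-- ===== CLAIM (what is proved, stated in full; the proofs are below) =====
def Claim_equal_get_rhomb : Prop := ∀ (h_ : Int) (char : String), Dom_get_rhomb h_ char → Spec_get_rhomb h_ char (get_rhomb h_ char)

-- ===== LEMMAS AND PROOFS =====

theorem rows_split (h_ : Int) :
    (PySem.List.pyRange 0 (2 * h_ - 1) 1).map (fun r => (h_ - 1) - |(h_ - 1) - r|) =
      PySem.List.pyRange 0 h_ 1 ++ PySem.List.pyRange ((h_ - 1) - 1) (0 - 1) (-1) := by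
  rcases (by omega : h_ ≤ 0 ∨ 0 < h_) with hle | hpos
  · rw [PySem.List.pyRange_one_eq_nil (by omega), PySem.List.pyRange_one_eq_nil (by omega),
      PySem.List.pyRange_neg_one_eq_nil (by omega)]
    rfl
  · rw [PySem.List.pyRange_one_append 0 h_ (2 * h_ - 1) (by omega) (by omega), List.map_append]
    congr 1
    · rw [List.map_congr_left (g := id) ?_, List.map_id]
      intro r hr
      rw [PySem.List.mem_pyRange_one] at hr
      simp only [id]
      rw [abs_of_nonneg (by omega)]
      omega
    · rw [PySem.List.pyRange_one, PySem.List.pyRange_neg_one, List.map_map]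
      have hlen : (2 * h_ - 1 - h_).toNat = (h_ - 1 - 1 - (0 - 1)).toNat := by omega
      rw [hlen]
      apply List.map_congr_left
      intro k _
      simp only [Function.comp]
      rw [abs_of_nonpos (by omega)]
      omega

-- ===== VERDICT (by name: the statement is the Claim_ definition above) =====
theorem get_rhomb_spec : Claim_equal_get_rhomb := by
  intro h_ char _
  show get_rhomb h_ char = get_rhomb_alt h_ char
  unfold get_rhomb get_rhomb_alt
  simp only [PySem.List.foldl_append_eq_flatMap, List.nil_append,
    List.flatMap_def, ← List.flatten_append, ← List.map_append, ← rows_split h_,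
    List.map_map]
  rfl
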